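-- pv_equiv track=rewrite | github.com/zhongshangwu/avatarai-social | at_demo/token2audio.py | _token_str_to_int
-- ===== SOURCE A (Python) =====
-- from typing import List, Callable, Optional, Dict, Any
--
-- def _token_str_to_int(token_str: str) -> List[int]:
--     """将token字符串转换为整数列表"""
--     tokens = []
--     curr_num = 0
--
--     for char in token_str:
--         if char.isdigit():
--             curr_num = curr_num * 10 + int(char)
--         else:
--             if curr_num != 0:
--                 tokens.append(curr_num)
--                 curr_num = 0
--
--     # 处理最后一个数字
--     if curr_num != 0:
--         tokens.append(curr_num)
--
--     return tokens
-- ===== SOURCE B (Python) =====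
-- import re
--
-- def _token_str_to_int(token_str):
--     """将token字符串转换为整数列表"""
--     return [n for m in re.findall(r'[0-9]+', token_str) if (n := int(m)) != 0]
-- ===== Notes on version B (the rewrite author's own statement) =====
-- stated objective: idiomatic
-- what changed: Replaced the char-by-char accumulator state machine with a regex tokenize (re.findall of maximal digit runs) followed by an int-convert-and-filter-nonzero comprehension.
import Mathlib
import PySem

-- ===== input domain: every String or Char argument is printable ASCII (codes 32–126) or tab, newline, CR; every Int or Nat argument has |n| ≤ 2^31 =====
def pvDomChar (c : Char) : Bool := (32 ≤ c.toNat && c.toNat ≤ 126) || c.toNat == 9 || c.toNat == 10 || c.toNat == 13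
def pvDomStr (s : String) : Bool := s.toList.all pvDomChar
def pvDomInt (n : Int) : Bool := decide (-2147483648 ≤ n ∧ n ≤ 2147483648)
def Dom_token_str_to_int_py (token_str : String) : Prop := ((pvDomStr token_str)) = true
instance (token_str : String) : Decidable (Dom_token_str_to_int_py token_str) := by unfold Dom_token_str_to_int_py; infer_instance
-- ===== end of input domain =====

-- B replaces A's char-by-char accumulator state machine by a regex-style tokenize
-- (maximal digit runs) then convert-and-filter pipeline; objective: idiomatic.

-- ===== PORT A =====
-- one loop step of A: state = (tokens, curr_num)
def pvStep (st : List Int × Int) (c : Char) : List Int × Int :=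
  if c.isDigit then (st.1, st.2 * 10 + ((c.toNat : Int) - 48))  -- char.isdigit / int(char); exact on ASCII domain
  else if st.2 ≠ 0 then (st.1 ++ [st.2], 0) else st

-- A's trailing flush after the loop
def pvFin (st : List Int × Int) : List Int :=
  if st.2 ≠ 0 then st.1 ++ [st.2] else st.1

def token_str_to_int_py (token_str : String) : List Int :=
  pvFin (token_str.toList.foldl pvStep ([], 0))

-- ===== PORT B =====
-- hand port of re.findall(r'[0-9]+', s): the maximal digit runs, left to right (exact on ASCII)
def pvDigitRuns : List Char → List (List Char)
  | [] => []
  | c :: cs =>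
    if c.isDigit then (c :: cs.takeWhile Char.isDigit) :: pvDigitRuns (cs.dropWhile Char.isDigit)
    else pvDigitRuns cs
termination_by cs => cs.length
decreasing_by
  · exact Nat.lt_succ_of_le (cs.length_dropWhile_le _)
  · exact Nat.lt_succ_self _

-- int(m) on a digit run (exact: m is nonempty and all digits)
def pvRunVal (m : List Char) : Int :=
  m.foldl (fun a c => a * 10 + ((c.toNat : Int) - 48)) 0

def token_str_to_int_py_alt (token_str : String) : List Int :=
  (pvDigitRuns token_str.toList).filterMap
    (fun m => if pvRunVal m ≠ 0 then some (pvRunVal m) else none)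

-- ===== PRECONDITION & SPEC =====
def Spec_token_str_to_int_py (token_str : String) (out : List Int) : Prop := out = token_str_to_int_py_alt token_str
instance (token_str : String) (out : List Int) : Decidable (Spec_token_str_to_int_py token_str out) := by unfold Spec_token_str_to_int_py; infer_instance

-- ===== CLAIM (what is proved, stated in full; the proofs are below) =====
def Claim_equal_token_str_to_int_py : Prop := ∀ (token_str : String), Dom_token_str_to_int_py token_str → Spec_token_str_to_int_py token_str (token_str_to_int_py token_str)

-- ===== LEMMAS AND PROOFS =====

-- the accumulated token list factors out of the fold
lemma pvStep_shift (cs : List Char) : ∀ (t : List Int) (n : Int),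
    List.foldl pvStep (t, n) cs =
      (t ++ (List.foldl pvStep ([], n) cs).1, (List.foldl pvStep ([], n) cs).2) := by
  induction cs with
  | nil => intro t n; simp
  | cons c cs ih =>
    intro t n
    simp only [List.foldl_cons]
    by_cases hd : c.isDigit
    · simp only [pvStep, hd, if_pos]
      rw [ih t]
    · by_cases hn : n = 0
      · subst hn
        simp only [pvStep, hd, Bool.false_eq_true, if_false, ne_eq, not_true_eq_false]
        rw [ih t]
      · simp only [pvStep, hd, Bool.false_eq_true, if_false, ne_eq, hn, not_false_iff, if_pos]
        rw [ih (t ++ [n]), ih ([] ++ [n])]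
        simp

lemma pvFin_shift (cs : List Char) (t : List Int) (n : Int) :
    pvFin (List.foldl pvStep (t, n) cs) = t ++ pvFin (List.foldl pvStep ([], n) cs) := by
  rw [pvStep_shift]
  unfold pvFin
  split <;> simp

-- mid-run invariant: continuing with accumulator n is: finish the current digit run
-- (seeded with n), flush it if nonzero, then restart at zero after the run
lemma pvRun (cs : List Char) : ∀ (n : Int),
    pvFin (List.foldl pvStep ([], n) cs) =
      (let v := List.foldl (fun a c => a * 10 + ((c.toNat : Int) - 48)) n (cs.takeWhile Char.isDigit)
       (if v ≠ 0 then [v] else []) ++ pvFin (List.foldl pvStep ([], 0) (cs.dropWhile Char.isDigit))) := by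
  induction cs with
  | nil =>
    intro n
    simp only [List.takeWhile_nil, List.foldl_nil, List.dropWhile_nil]
    by_cases hn : n = 0 <;> simp [pvFin, hn]
  | cons c cs ih =>
    intro n
    by_cases hd : c.isDigit
    · simp only [List.foldl_cons, List.takeWhile_cons, List.dropWhile_cons, hd, if_pos,
        pvStep]
      exact ih (n * 10 + ((c.toNat : Int) - 48))
    · by_cases hn : n = 0
      · subst hn
        simp [hd, pvStep]
      · have hstep : pvStep ([], n) c = ([n], 0) := by simp [pvStep, hd, hn]
        have hstep0 : pvStep ([], 0) c = ([], 0) := by simp [pvStep, hd]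
        simp only [List.foldl_cons, List.takeWhile_cons, List.dropWhile_cons, hd,
          Bool.false_eq_true, if_false, List.foldl_nil, hstep, hstep0]
        rw [pvFin_shift]
        simp [hn]

-- main correspondence: A's state machine over cs produces B's tokenize-filter result
theorem pvMain (cs : List Char) :
    pvFin (List.foldl pvStep ([], 0) cs) =
      (pvDigitRuns cs).filterMap (fun m => if pvRunVal m ≠ 0 then some (pvRunVal m) else none) := by
  match cs with
  | [] => simp [pvFin, pvDigitRuns]
  | c :: cs =>
    by_cases hd : c.isDigit
    · have h1 : pvDigitRuns (c :: cs) =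
          (c :: cs.takeWhile Char.isDigit) :: pvDigitRuns (cs.dropWhile Char.isDigit) := by
        rw [pvDigitRuns]; simp [hd]
      have hrec := pvMain (cs.dropWhile Char.isDigit)
      have hv : pvRunVal (c :: cs.takeWhile Char.isDigit) =
          List.foldl (fun a c => a * 10 + ((c.toNat : Int) - 48))
            (0 * 10 + ((c.toNat : Int) - 48)) (cs.takeWhile Char.isDigit) := by
        simp [pvRunVal]
      simp only [List.foldl_cons, pvStep, hd, if_pos]
      rw [pvRun, h1]
      simp only [List.filterMap_cons]
      rw [← hrec, ← hv]
      split <;> simp_all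
    · have h1 : pvDigitRuns (c :: cs) = pvDigitRuns cs := by
        rw [pvDigitRuns]; simp [hd]
      have hrec := pvMain cs
      simp only [List.foldl_cons, pvStep, hd, Bool.false_eq_true, if_false, ne_eq,
        not_true_eq_false]
      rw [h1]
      exact hrec
termination_by cs.length
decreasing_by
  · exact Nat.lt_succ_of_le (cs.length_dropWhile_le _)
  · exact Nat.lt_succ_self _

-- ===== VERDICT (by name: the statement is the Claim_ definition above) =====
theorem token_str_to_int_py_spec : Claim_equal_token_str_to_int_py := by
  intro s _
  unfold Spec_token_str_to_int_py token_str_to_int_py token_str_to_int_py_alt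
  exact pvMain s.toList
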